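-- pv_equiv track=rewrite | github.com/erock530/ai | multi-agent/agent_logic/agent.py | _parse_messages_athropic
-- ===== SOURCE A (Python) =====
-- def _parse_messages_athropic(messages):
--     # messages have to alternate between user and assistant. However this is not always the case in the input. Join not alternating messages with "\n\n".
--     alternating_messages = []
--     last_role = None
--     for message in messages:
--         if last_role == None:
--             if message["role"] == "user":
--                 alternating_messages.append(message)
--                 last_role = "user"
--             continue
--         if message["role"] != last_role:
--             alternating_messages.append(message)
--             last_role = message["role"]
--         else:
--             alternating_messages[-1]["content"] += "\n\n" + message["content"]
--     return alternating_messages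
-- ===== SOURCE B (Python) =====
-- def _runs(msgs):
--     # decompose into consecutive same-role runs: (first message, rest of run)
--     runs = []
--     i = 0
--     while i < len(msgs):
--         j = i + 1
--         while j < len(msgs) and msgs[j]["role"] == msgs[i]["role"]:
--             j += 1
--         runs.append((msgs[i], msgs[i + 1:j]))
--         i = j
--     return runs
--
--
-- def _parse_messages_athropic(messages):
--     # drop leading messages until the first 'user' one
--     start = 0
--     while start < len(messages) and messages[start]["role"] != "user":
--         start += 1
--     # collapse each run into its first dict (reused, so extra keys survive)
--     out = []
--     for first, rest in _runs(messages[start:]):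
--         for m in rest:
--             first["content"] += "\n\n" + m["content"]
--         out.append(first)
--     return out
-- ===== Notes on version B (the rewrite author's own statement) =====
-- stated objective: alternative
-- what changed: Replaces A's single-pass last_role state machine (append-then-mutate alternating_messages[-1]) by two explicit phases: skip the prefix before the first 'user' message, decompose the rest into consecutive same-role runs, and merge each run into its (reused) first dict.
import Mathlib
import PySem

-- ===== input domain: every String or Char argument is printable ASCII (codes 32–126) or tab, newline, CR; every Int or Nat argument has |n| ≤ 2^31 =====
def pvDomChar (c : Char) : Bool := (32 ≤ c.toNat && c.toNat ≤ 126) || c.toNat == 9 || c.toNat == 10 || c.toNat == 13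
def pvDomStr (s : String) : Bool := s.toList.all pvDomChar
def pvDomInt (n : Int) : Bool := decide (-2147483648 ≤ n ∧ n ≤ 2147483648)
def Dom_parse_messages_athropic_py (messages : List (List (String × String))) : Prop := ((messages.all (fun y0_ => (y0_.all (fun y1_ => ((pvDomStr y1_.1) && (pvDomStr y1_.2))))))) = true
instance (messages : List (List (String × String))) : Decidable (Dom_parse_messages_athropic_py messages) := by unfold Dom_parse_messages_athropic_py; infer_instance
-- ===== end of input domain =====

-- B collapses the messages in two explicit phases (drop the pre-'user' prefix, then
-- decompose into consecutive same-role runs and merge each run into its first dict)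
-- instead of A's single last_role state machine; same cost, different decomposition.
-- Both Pythons mutate the argument dicts' 'content' in place; the equivalence proved
-- here is about the RETURN value only.

-- shared dict accessors (both Pythons read m["role"] / m["content"] and do
-- first["content"] += "\n\n" + c, modelled on assoc lists via PySem.Dict)
def pvRole (m : List (String × String)) : String := (PySem.Dict.mk m).getD "role" ""
def pvContent (m : List (String × String)) : String := (PySem.Dict.mk m).getD "content" ""
def pvAddContent (m : List (String × String)) (c : String) : List (String × String) :=
  ((PySem.Dict.mk m).insert "content" (pvContent m ++ ("\n\n" ++ c))).items

-- ===== PORT A =====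
-- accumulator list kept reversed: Python append = cons, alternating_messages[-1] = head
def pvAStep (st : List (List (String × String)) × Option String) (message : List (String × String)) :
    List (List (String × String)) × Option String :=
  match st with
  | (acc, none) => if pvRole message = "user" then (message :: acc, some "user") else (acc, none)
  | (acc, some lr) =>
    if pvRole message ≠ lr then (message :: acc, some (pvRole message))
    else
      match acc with
      | [] => ([], some lr)  -- unreachable: last_role ≠ None ⇒ list nonempty (Python would IndexError)
      | a :: rest => (pvAddContent a (pvContent message) :: rest, some lr)

def parse_messages_athropic_py (messages : List (List (String × String))) : List (List (String × String)) :=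
  ((messages.foldl pvAStep ([], none)).1).reverse

-- ===== PORT B =====
-- _runs: consecutive same-role run decomposition, (first, rest-of-run) pairs
def pvRuns : List (List (String × String)) → List ((List (String × String)) × List (List (String × String)))
  | [] => []
  | m :: ms =>
    (m, ms.takeWhile (fun x => pvRole x == pvRole m)) :: pvRuns (ms.dropWhile (fun x => pvRole x == pvRole m))
  termination_by l => l.length
  decreasing_by
    simp only [List.length_cons]
    have := List.length_dropWhile_le (fun x => pvRole x == pvRole m) ms
    omega

-- the inner merge loop: fold the rest of a run into its first dict
def pvMergeRun (first : List (String × String)) (rest : List (List (String × String))) : List (String × String) :=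
  rest.foldl (fun f m => pvAddContent f (pvContent m)) first

def parse_messages_athropic_py_alt (messages : List (List (String × String))) : List (List (String × String)) :=
  (pvRuns (messages.dropWhile (fun m => pvRole m != "user"))).map (fun g => pvMergeRun g.1 g.2)

-- ===== PRECONDITION & SPEC =====
-- Pre_ excludes exactly (a) messages with duplicate keys, where the Python-dict /
-- assoc-list correspondence is ambiguous (no actual Python dict has them), and (b) the
-- inputs on which A raises KeyError: a message lacking "role", or a message lacking
-- "content" that sits next to a same-role neighbour (so it gets merged) after the
-- skipped non-'user' prefix.
def Pre_parse_messages_athropic_py (messages : List (List (String × String))) : Prop :=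
  (∀ m ∈ messages, (m.map Prod.fst).Nodup ∧ "role" ∈ m.map Prod.fst) ∧
  List.IsChain (fun a b => pvRole a = pvRole b →
      ("content" ∈ a.map Prod.fst ∧ "content" ∈ b.map Prod.fst))
    (messages.dropWhile (fun m => pvRole m != "user"))
instance (messages : List (List (String × String))) : Decidable (Pre_parse_messages_athropic_py messages) := by
  unfold Pre_parse_messages_athropic_py; infer_instance

def pvWitness_parse_messages_athropic_py : (List (List (String × String))) :=
  [[("role", "user"), ("content", "hi")], [("role", "user"), ("content", "again")], [("role", "assistant"), ("content", "yo")]]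

def Spec_parse_messages_athropic_py (messages : List (List (String × String))) (out : List (List (String × String))) : Prop := out = parse_messages_athropic_py_alt messages
instance (messages : List (List (String × String))) (out : List (List (String × String))) : Decidable (Spec_parse_messages_athropic_py messages out) := by unfold Spec_parse_messages_athropic_py; infer_instance

-- ===== CLAIM (what is proved, stated in full; the proofs are below) =====
def Claim_equal_parse_messages_athropic_py : Prop := ∀ (messages : List (List (String × String))), Dom_parse_messages_athropic_py messages → Pre_parse_messages_athropic_py messages → Spec_parse_messages_athropic_py messages (parse_messages_athropic_py messages)

-- ===== LEMMAS AND PROOFS =====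

-- mutating "content" does not change the role of a message
lemma pvRole_addContent (a : List (String × String)) (c : String) : pvRole (pvAddContent a c) = pvRole a := by
  simp only [pvRole, pvAddContent]
  exact PySem.Dict.getD_insert_of_ne _ _ _ (by decide)

-- the merge loop commutes with consing one more merged message
lemma pvMergeRun_cons (a m : List (String × String)) (rest : List (List (String × String))) :
    pvMergeRun a (m :: rest) = pvMergeRun (pvAddContent a (pvContent m)) rest := rfl

-- main invariant: once a first 'user' message has been kept, A's fold over the rest
-- produces exactly B's merged runs (reversed, on top of the already-built accumulator)
lemma foldl_pvAStep_run (ms : List (List (String × String))) :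
    ∀ (a : List (String × String)) (acc : List (List (String × String))),
      (ms.foldl pvAStep (a :: acc, some (pvRole a))).1
        = ((pvRuns (a :: ms)).map (fun g => pvMergeRun g.1 g.2)).reverse ++ acc := by
  induction ms with
  | nil =>
    intro a acc
    simp [pvRuns, pvMergeRun]
  | cons m ms ih =>
    intro a acc
    by_cases h : pvRole m = pvRole a
    · have hstep : pvAStep (a :: acc, some (pvRole a)) m
          = (pvAddContent a (pvContent m) :: acc, some (pvRole a)) := by
        simp [pvAStep, h]
      have hrole := pvRole_addContent a (pvContent m)
      calc ((m :: ms).foldl pvAStep (a :: acc, some (pvRole a))).1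
          = (ms.foldl pvAStep (pvAddContent a (pvContent m) :: acc, some (pvRole a))).1 := by
            simp [List.foldl_cons, hstep]
        _ = (ms.foldl pvAStep (pvAddContent a (pvContent m) :: acc, some (pvRole (pvAddContent a (pvContent m))))).1 := by rw [hrole]
        _ = ((pvRuns (pvAddContent a (pvContent m) :: ms)).map (fun g => pvMergeRun g.1 g.2)).reverse ++ acc := ih _ acc
        _ = ((pvRuns (a :: m :: ms)).map (fun g => pvMergeRun g.1 g.2)).reverse ++ acc := by
            rw [pvRuns, pvRuns]
            simp only [hrole, List.takeWhile_cons, List.dropWhile_cons, h, beq_self_eq_true, if_true]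
            simp [pvMergeRun_cons]
    · have hstep : pvAStep (a :: acc, some (pvRole a)) m = (m :: a :: acc, some (pvRole m)) := by
        simp [pvAStep, h]
      calc ((m :: ms).foldl pvAStep (a :: acc, some (pvRole a))).1
          = (ms.foldl pvAStep (m :: (a :: acc), some (pvRole m))).1 := by
            simp [List.foldl_cons, hstep]
        _ = ((pvRuns (m :: ms)).map (fun g => pvMergeRun g.1 g.2)).reverse ++ (a :: acc) := ih m (a :: acc)
        _ = ((pvRuns (a :: m :: ms)).map (fun g => pvMergeRun g.1 g.2)).reverse ++ acc := by
            conv_rhs => rw [pvRuns]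
            simp only [List.takeWhile_cons, List.dropWhile_cons]
            have hb : (pvRole m == pvRole a) = false := by simpa using h
            simp [hb, pvMergeRun]

-- the whole function: the leading skip phase, then the invariant
lemma parse_messages_eq (messages : List (List (String × String))) :
    parse_messages_athropic_py messages = parse_messages_athropic_py_alt messages := by
  induction messages with
  | nil => simp [parse_messages_athropic_py, parse_messages_athropic_py_alt, pvRuns]
  | cons m ms ih =>
    by_cases h : pvRole m = "user"
    · have hstep : pvAStep ([], none) m = ([m], some (pvRole m)) := by
        simp [pvAStep, h]
      unfold parse_messages_athropic_py parse_messages_athropic_py_alt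
      rw [List.foldl_cons, hstep, foldl_pvAStep_run ms m []]
      have hd : (m :: ms).dropWhile (fun m => pvRole m != "user") = m :: ms := by
        simp [h]
      rw [hd]
      simp
    · have hstep : pvAStep ([], none) m = ([], none) := by
        simp [pvAStep, h]
      unfold parse_messages_athropic_py parse_messages_athropic_py_alt at *
      rw [List.foldl_cons, hstep]
      have hd : (m :: ms).dropWhile (fun m => pvRole m != "user")
          = ms.dropWhile (fun m => pvRole m != "user") := by
        simp [h]
      rw [hd]
      exact ih

-- ===== VERDICT (by name: the statement is the Claim_ definition above) =====
theorem parse_messages_athropic_py_spec : Claim_equal_parse_messages_athropic_py := by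
  intro messages _ _
  unfold Spec_parse_messages_athropic_py
  exact parse_messages_eq messages
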